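-- pv_equiv track=rewrite | github.com/Abdulaziz-Alhefdhi/satd_id_desc | generate/train/support_functions.py | tokenize_data
-- ===== SOURCE A (Python) =====
-- def tokenize_data(ils, tls):
--     input_tokens, target_tokens = set(), set()
--     for input_list, target_list in zip(ils, tls):
--         for token in input_list:
--             input_tokens.add(token)
--         for token in target_list:
--             target_tokens.add(token)
--     return sorted(list(input_tokens))+["<unknown>"], sorted(list(target_tokens))+["<unknown>"]
-- ===== SOURCE B (Python) =====
-- def tokenize_data(ils, tls):
--     flat_in, flat_tgt = [], []
--     for input_list, target_list in zip(ils, tls):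
--         flat_in.extend(input_list)
--         flat_tgt.extend(target_list)
--     flat_in.sort()
--     flat_tgt.sort()
--     def uniq(xs):
--         out = []
--         for x in xs:
--             if not out or out[-1] != x:
--                 out.append(x)
--         return out
--     return uniq(flat_in) + ["<unknown>"], uniq(flat_tgt) + ["<unknown>"]
-- ===== Notes on version B (the rewrite author's own statement) =====
-- stated objective: alternative
-- what changed: B never builds a set: it flattens the zipped token lists, sorts each flat list once, and removes consecutive duplicates in a single linear pass, instead of accumulating hash sets and sorting their elements.
import Mathlib
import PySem

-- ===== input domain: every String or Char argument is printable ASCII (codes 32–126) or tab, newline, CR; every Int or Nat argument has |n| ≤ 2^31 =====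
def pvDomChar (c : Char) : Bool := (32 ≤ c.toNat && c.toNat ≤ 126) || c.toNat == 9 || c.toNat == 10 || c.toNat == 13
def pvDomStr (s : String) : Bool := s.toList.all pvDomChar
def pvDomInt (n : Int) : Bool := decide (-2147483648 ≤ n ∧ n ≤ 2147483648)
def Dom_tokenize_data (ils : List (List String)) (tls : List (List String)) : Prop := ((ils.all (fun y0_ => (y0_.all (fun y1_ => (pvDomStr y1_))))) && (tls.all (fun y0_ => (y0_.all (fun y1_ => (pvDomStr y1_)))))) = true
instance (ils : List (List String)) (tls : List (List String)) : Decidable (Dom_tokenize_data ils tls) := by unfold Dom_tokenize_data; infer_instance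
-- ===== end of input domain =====

-- ===== PORT A =====
-- B builds no set: it flattens, sorts once and removes consecutive duplicates; same cost class, different algorithm.
def tokenize_data (ils : List (List String)) (tls : List (List String)) : List String × List String :=
  let st := (ils.zip tls).foldl
    (fun (st : PySem.Set String × PySem.Set String) p =>
      (p.1.foldl PySem.Set.add st.1, p.2.foldl PySem.Set.add st.2))
    (PySem.Set.empty, PySem.Set.empty)
  (PySem.List.sorted st.1 (fun x => x) false ++ ["<unknown>"],
   PySem.List.sorted st.2 (fun x => x) false ++ ["<unknown>"])

-- ===== PORT B =====
-- uniq: the linear pass 'if not out or out[-1] != x: out.append(x)' (out[-1] on a nonempty list = getLast?)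
def pvUniq (xs : List String) : List String :=
  xs.foldl (fun out x => if out.isEmpty || (out.getLast? != some x) then out ++ [x] else out) []

def tokenize_data_alt (ils : List (List String)) (tls : List (List String)) : List String × List String :=
  let flats := (ils.zip tls).foldl (fun acc p => (acc.1 ++ p.1, acc.2 ++ p.2)) ([], [])
  (pvUniq (PySem.List.sorted flats.1 (fun x => x) false) ++ ["<unknown>"],
   pvUniq (PySem.List.sorted flats.2 (fun x => x) false) ++ ["<unknown>"])

-- ===== PRECONDITION & SPEC =====
def Spec_tokenize_data (ils : List (List String)) (tls : List (List String)) (out : List String × List String) : Prop := out = tokenize_data_alt ils tls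
instance (ils : List (List String)) (tls : List (List String)) (out : List String × List String) : Decidable (Spec_tokenize_data ils tls out) := by unfold Spec_tokenize_data; infer_instance

-- ===== CLAIM (what is proved, stated in full; the proofs are below) =====
def Claim_equal_tokenize_data : Prop := ∀ (ils : List (List String)) (tls : List (List String)), Dom_tokenize_data ils tls → Spec_tokenize_data ils tls (tokenize_data ils tls)

-- ===== LEMMAS AND PROOFS =====

-- in a strictly increasing list every element is at most the last one
lemma le_getLast_of_pairwise_lt (l : List String) (h : l.Pairwise (· < ·)) (hne : l ≠ []) :
    ∀ a ∈ l, a ≤ l.getLast hne := by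
  intro a ha
  have hd := List.dropLast_append_getLast hne
  rw [← hd] at h ha
  rcases List.mem_append.mp ha with h' | h'
  · exact ((List.pairwise_append.mp h).2.2 a h' _ (by simp)).le
  · simp only [List.mem_singleton] at h'; exact h'.le

-- the B-side flattening loop, in closed form
lemma flatpair_eq (ps : List (List String × List String)) : ∀ (a b : List String),
    ps.foldl (fun acc p => (acc.1 ++ p.1, acc.2 ++ p.2)) (a, b)
    = (a ++ ps.flatMap Prod.fst, b ++ ps.flatMap Prod.snd) := by
  induction ps with
  | nil => intro a b; simp
  | cons p ps ih =>
    intro a b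
    simp only [List.foldl_cons, List.flatMap_cons, ih, List.append_assoc]

-- two strictly increasing lists with the same members are equal
lemma eq_of_pairwise_lt_mem (l1 l2 : List String) (h1 : l1.Pairwise (· < ·))
    (h2 : l2.Pairwise (· < ·)) (hm : ∀ y, y ∈ l1 ↔ y ∈ l2) : l1 = l2 := by
  have hp : l1.Perm l2 := (List.perm_ext_iff_of_nodup h1.nodup h2.nodup).mpr hm
  exact hp.eq_of_pairwise (fun a b _ _ hab hba => le_antisymm hab.le hba.le) h1 h2

-- invariant of the uniq pass: on a (≤)-sorted input whose elements dominate out, the result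
-- is strictly increasing and its members are out's plus the input's
lemma pvUniq_aux (xs : List String) : ∀ (out : List String),
    out.Pairwise (· < ·) → xs.Pairwise (· ≤ ·) → (∀ a ∈ out, ∀ b ∈ xs, a ≤ b) →
    (xs.foldl (fun out x => if out.isEmpty || (out.getLast? != some x) then out ++ [x] else out) out).Pairwise (· < ·) ∧
    (∀ y, y ∈ xs.foldl (fun out x => if out.isEmpty || (out.getLast? != some x) then out ++ [x] else out) out ↔ y ∈ out ∨ y ∈ xs) := by
  induction xs with
  | nil => intro out h1 _ _; exact ⟨h1, fun y => by simp⟩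
  | cons x xs ih =>
    intro out h1 h2 hcross
    simp only [List.foldl_cons]
    by_cases hg : (out.isEmpty || (out.getLast? != some x)) = true
    · rw [if_pos hg]
      have hnotmem : x ∉ out := by
        intro hx
        rcases Bool.or_eq_true_iff.mp hg with h | h
        · simp [List.isEmpty_iff.mp h] at hx
        · have hne : out ≠ [] := by rintro rfl; simp at hx
          have hlast := List.getLast_mem hne
          rw [List.getLast?_eq_some_getLast hne] at h
          have hxne : out.getLast hne ≠ x := by simpa using h
          have h1' := le_getLast_of_pairwise_lt out h1 hne x hx
          have h2' := hcross (out.getLast hne) hlast x (by simp)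
          exact hxne (le_antisymm h2' h1')
      have hout' : (out ++ [x]).Pairwise (· < ·) := by
        rw [List.pairwise_append]
        refine ⟨h1, by simp, ?_⟩
        intro a ha b hb
        rw [List.mem_singleton.mp hb]
        exact lt_of_le_of_ne (hcross a ha x (by simp)) (fun h => hnotmem (h ▸ ha))
      have hcross' : ∀ a ∈ out ++ [x], ∀ b ∈ xs, a ≤ b := by
        intro a ha b hb
        rcases List.mem_append.mp ha with h | h
        · exact hcross a h b (List.mem_cons_of_mem _ hb)
        · rw [List.mem_singleton.mp h]
          exact (List.pairwise_cons.mp h2).1 b hb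
      obtain ⟨p1, p2⟩ := ih (out ++ [x]) hout' (List.pairwise_cons.mp h2).2 hcross'
      refine ⟨p1, fun y => ?_⟩
      rw [p2 y]; simp [or_assoc, or_comm, or_left_comm]
    · rw [if_neg hg]
      have hmem : x ∈ out := by
        have hg' : (out.isEmpty || (out.getLast? != some x)) = false :=
          Bool.not_eq_true _ ▸ hg
        obtain ⟨he, hl⟩ := Bool.or_eq_false_iff.mp hg'
        exact List.mem_of_getLast? (by simpa using hl)
      have hcross' : ∀ a ∈ out, ∀ b ∈ xs, a ≤ b :=
        fun a ha b hb => hcross a ha b (List.mem_cons_of_mem _ hb)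
      obtain ⟨p1, p2⟩ := ih out h1 (List.pairwise_cons.mp h2).2 hcross'
      refine ⟨p1, fun y => ?_⟩
      rw [p2 y]
      constructor
      · rintro (h | h)
        · exact Or.inl h
        · exact Or.inr (List.mem_cons_of_mem _ h)
      · rintro (h | h)
        · exact Or.inl h
        · rcases List.mem_cons.mp h with rfl | h
          · exact Or.inl hmem
          · exact Or.inr h

lemma pvUniq_pairwise (xs : List String) (h : xs.Pairwise (· ≤ ·)) :
    (pvUniq xs).Pairwise (· < ·) :=
  (pvUniq_aux xs [] (by simp) h (by simp)).1

lemma mem_pvUniq (xs : List String) (h : xs.Pairwise (· ≤ ·)) (y : String) :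
    y ∈ pvUniq xs ↔ y ∈ xs := by
  rw [pvUniq, (pvUniq_aux xs [] (by simp) h (by simp)).2 y]; simp

-- the A-side pair of set-building loops = Set.add folded over B's flattened lists
lemma pairfold_eq (ps : List (List String × List String)) : ∀ (s t : PySem.Set String),
    ps.foldl (fun (st : PySem.Set String × PySem.Set String) p =>
        (p.1.foldl PySem.Set.add st.1, p.2.foldl PySem.Set.add st.2)) (s, t)
    = ((ps.flatMap Prod.fst).foldl PySem.Set.add s, (ps.flatMap Prod.snd).foldl PySem.Set.add t) := by
  induction ps with
  | nil => intro s t; simp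
  | cons p ps ih =>
    intro s t
    simp only [List.foldl_cons, List.flatMap_cons, List.foldl_append]
    exact ih _ _

-- sorted-with-sentinel of the set A built = uniq of the sorted flat list B built
lemma side_eq (flat : List String) :
    PySem.List.sorted (flat.foldl PySem.Set.add PySem.Set.empty) (fun x => x) false
    = pvUniq (PySem.List.sorted flat (fun x => x) false) := by
  have hofl : flat.foldl PySem.Set.add PySem.Set.empty = PySem.Set.ofList flat := rfl
  rw [hofl]
  have hsorted : (PySem.List.sorted flat (fun x => x) false).Pairwise (· ≤ ·) := by
    simpa using PySem.List.sorted_pairwise flat (fun x => x)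
  apply eq_of_pairwise_lt_mem
  · exact PySem.List.sorted_ofList_pairwise_lt flat
  · exact pvUniq_pairwise _ hsorted
  · intro y
    rw [mem_pvUniq _ hsorted]
    simp [PySem.List.mem_sorted, PySem.Set.mem_ofList]

-- ===== VERDICT (by name: the statement is the Claim_ definition above) =====
theorem tokenize_data_spec : Claim_equal_tokenize_data := by
  intro ils tls _
  unfold Spec_tokenize_data tokenize_data tokenize_data_alt
  rw [pairfold_eq]
  rw [flatpair_eq]
  simp only [List.nil_append]
  rw [side_eq, side_eq]
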